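-- pv_equiv track=rewrite | github.com/newkimjiwon/CodingTest | BAEKJOON/G2/20926번_얼음 미로.py | solution
-- ===== SOURCE A (Python) =====
-- from heapq import heappush, heappop
--
-- move = [(0, 1), (0, -1), (-1 ,0), (1, 0)]
--
-- def solution(maps):
--     # 시작/도착 좌표 찾기
--     tera_y = tera_x = goal_y = goal_x = 0
--     H, W = len(maps), len(maps[0])
--     for i in range(H):
--         for ii in range(W):
--             if maps[i][ii] == 'E':
--                 goal_y, goal_x = i, ii
--             if maps[i][ii] == 'T':
--                 tera_y, tera_x = i, ii
--
--     # 다익스트라: 좌표별 최소 비용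
--     INF = 10**18
--     dist = [[INF] * W for _ in range(H)]
--     dist[tera_y][tera_x] = 0
--
--     # 우선순위 큐(비용, y, x)
--     pq = []
--     heappush(pq, (0, tera_y, tera_x))
--
--     while pq:
--         cur_cost, ry, rx = heappop(pq)
--         if cur_cost != dist[ry][rx]:
--             continue
--         if (ry, rx) == (goal_y, goal_x):
--             return cur_cost  # 최단 비용 확정
--
--         for iy, ix in move:
--             res = r_move(maps, ry, rx, iy, ix)  # 원래 r_move 유지
--             if res is None:
--                 continue
--             y, x, c_dis = res
--             nd = cur_cost + c_dis
--             if nd < dist[y][x]: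
--                 dist[y][x] = nd
--                 heappush(pq, (nd, y, x))
--
--     return -1  # 도달 불가
--
-- def r_move(maps, ry, rx, my, mx):
--     """
--     (ry,rx)에서 (my,mx)로 미끄러졌을 때의 도착 좌표와 누적 시간 반환.
--     - 시작 타일 비용 제외
--     - 출구(E) 타일 비용 제외
--     - 구멍(H)·절벽은 None (이동 불가)
--     - 바위(R)는 직전 칸에서 멈춤
--     """
--     H, W = len(maps), len(maps[0])
--     y, x, dis = ry, rx, 0
--
--     while True:
--         # 이동 전 위치
--         py, px = y, x
--         # 한 칸 이동
--         y += my
--         x += mx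
--
--         # 절벽
--         if y < 0 or y >= H or x < 0 or x >= W:
--             return None
--         cell = maps[y][x]
--
--         # 구멍
--         if cell == 'H':
--             return None
--         # 바위 → 직전 칸에서 멈춤
--         if cell == 'R':
--             return (py, px, dis)
--         # 출구 → 출구 비용 제외
--         if cell == 'E':
--             return (y, x, dis)
--         # 숫자면 비용 누적 (시작 타일은 이미 제외됨)
--         if '0' <= cell <= '9':
--             dis += ord(cell) - ord('0')
-- ===== SOURCE B (Python) =====
-- def solution(maps):
--     H, W = len(maps), len(maps[0])
--     INF = 10**18
--
--     positions = [(i, j) for i in range(H) for j in range(W)]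
--     ts = [p for p in positions if maps[p[0]][p[1]] == 'T']
--     es = [p for p in positions if maps[p[0]][p[1]] == 'E']
--     tera = ts[-1] if ts else (0, 0)
--     goal = es[-1] if es else (0, 0)
--
--     def ray(y, x, dy, dx):
--         # cells visited while sliding from (y,x), in order, up to the wall
--         n = (W - 1 - x if dx > 0 else x) if dx != 0 else (H - 1 - y if dy > 0 else y)
--         return [(y + dy * k, x + dx * k) for k in range(1, n + 1)]
--
--     def edge(y, x, dy, dx):
--         cost = 0
--         py, px = y, x
--         for ny, nx in ray(y, x, dy, dx):
--             c = maps[ny][nx]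
--             if c == 'H':
--                 return None
--             if c == 'R':
--                 return (py, px, cost)
--             if c == 'E':
--                 return (ny, nx, cost)
--             if '0' <= c <= '9':
--                 cost += ord(c) - ord('0')
--             py, px = ny, nx
--         return None  # slid off the edge of the grid
--
--     # flat edge list: every slide simulated once, up front
--     edges = []
--     for (i, j) in positions:
--         for dy, dx in ((0, 1), (0, -1), (-1, 0), (1, 0)):
--             e = edge(i, j, dy, dx)
--             if e is not None:
--                 edges.append(((i, j), (e[0], e[1]), e[2]))
--
--     # Bellman-Ford, Jacobi style: relax every edge in rounds until nothing changes
--     dist = {p: (0 if p == tera else INF) for p in positions}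
--     while True:
--         new = dict(dist)
--         for u, v, w in edges:
--             if dist[u] + w < new[v]:
--                 new[v] = dist[u] + w
--         if new == dist:
--             break
--         dist = new
--
--     d = dist[goal]
--     return d if d < INF else -1
-- ===== Notes on version B (the rewrite author's own statement) =====
-- stated objective: alternative
-- what changed: B replaces A's heap-based Dijkstra (r_move simulated lazily inside each relaxation) by a precomputed flat slide-edge list followed by Bellman-Ford: whole-edge-list relaxation rounds iterated to a fixpoint, with no priority queue, no early exit and a dict of distances; correct because all slide costs are nonnegative digit sums, so Dijkstra's popped cost and the Bellman-Ford fixpoint both equal the least walk cost.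
-- outside the precondition, e.g. on solution([['T', 'R', '5x']]): A returns 0, B raises TypeError; on solution([['a', 'b'], ['c']]): A raises IndexError, B raises IndexError
import Mathlib
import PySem

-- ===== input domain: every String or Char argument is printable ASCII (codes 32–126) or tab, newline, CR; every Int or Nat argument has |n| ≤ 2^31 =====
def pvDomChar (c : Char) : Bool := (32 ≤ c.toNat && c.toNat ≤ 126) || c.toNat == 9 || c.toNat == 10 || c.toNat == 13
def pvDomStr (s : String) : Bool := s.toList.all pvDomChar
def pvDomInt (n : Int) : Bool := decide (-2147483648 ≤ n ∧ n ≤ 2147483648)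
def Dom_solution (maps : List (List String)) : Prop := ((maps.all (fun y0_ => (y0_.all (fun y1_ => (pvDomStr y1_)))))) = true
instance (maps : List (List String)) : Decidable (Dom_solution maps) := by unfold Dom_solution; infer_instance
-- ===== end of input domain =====

-- B replaces A's heap-based Dijkstra by a precomputed flat slide-edge list followed by
-- Bellman-Ford relaxation rounds iterated to a fixpoint (objective: alternative; the two
-- agree because all slide costs are nonnegative digit sums).

-- shared infrastructure (models of Python builtins used by BOTH sources):
-- maps[y][x] (both indexes in range on every admitted execution)
def pvCell (maps : List (List String)) (y x : Int) : String :=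
  PySem.List.pyGetD (PySem.List.pyGetD maps y []) x ""

-- Python 'a <= b' on strings: lexicographic by code point (exact)
def pvLexLe : List Char → List Char → Bool
  | [], _ => true
  | _ :: _, [] => false
  | a :: as, b :: bs => a.toNat < b.toNat || (a == b && pvLexLe as bs)

def pvStrLe (a b : String) : Bool := pvLexLe a.toList b.toList

-- ord(cell) - ord('0'); exact on the single-character strings Pre_ admits here
def pvOrd0 (s : String) : Int := ((s.toList.headD ' ').toNat : Int) - 48

def pvINF : Int := 10 ^ 18

-- ===== PORT A =====
-- heapq model: heappop = remove the lexicographically smallest triple; heappush is append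
def pvLex3 (a b : Int × Int × Int) : Bool :=
  a.1 < b.1 || (a.1 == b.1 && (a.2.1 < b.2.1 || (a.2.1 == b.2.1 && a.2.2 < b.2.2)))

def pvPopMin (pq : List (Int × Int × Int)) :
    Option ((Int × Int × Int) × List (Int × Int × Int)) :=
  match pq with
  | [] => none
  | h :: t =>
    let m := t.foldl (fun acc e => if pvLex3 e acc then e else acc) h
    some (m, (h :: t).erase m)

-- fuel bound for A's 'while pq:' (never reached on any admitted input; proved sufficient below)
def pvFuel (maps : List (List String)) : Nat :=
  let N := maps.length * (maps.headD []).length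
  N * (9 * N * N + 2) + N + 2

-- fuel for one slide (a slide leaves the grid after at most max(H,W) steps)
def pvSlideFuel (maps : List (List String)) : Nat :=
  maps.length + (maps.headD []).length + 2

def moveA : List (Int × Int) := [(0, 1), (0, -1), (-1, 0), (1, 0)]

-- r_move: the while-True slide, step for step (fuel only makes it total)
def rmoveA (maps : List (List String)) (H W my mx : Int) :
    Nat → Int → Int → Int → Option (Int × Int × Int)
  | 0, _, _, _ => none
  | fuel + 1, y, x, dis =>
    let py := y
    let px := x
    let y' := y + my
    let x' := x + mx
    if y' < 0 ∨ y' ≥ H ∨ x' < 0 ∨ x' ≥ W then none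
    else
      let cell := pvCell maps y' x'
      if cell == "H" then none
      else if cell == "R" then some (py, px, dis)
      else if cell == "E" then some (y', x', dis)
      else if pvStrLe "0" cell && pvStrLe cell "9" then
        rmoveA maps H W my mx fuel y' x' (dis + pvOrd0 cell)
      else rmoveA maps H W my mx fuel y' x' dis

-- the start/goal scan: nested for i / for ii, overwriting on every 'E' / 'T'
def scanTE (maps : List (List String)) (H W : Int) : (Int × Int) × (Int × Int) :=
  (PySem.List.pyRange 0 H 1).foldl (fun s i =>
    (PySem.List.pyRange 0 W 1).foldl (fun s ii =>
      let s1 := if pvCell maps i ii == "E" then (s.1, (i, ii)) else s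
      if pvCell maps i ii == "T" then ((i, ii), s1.2) else s1) s)
    ((0, 0), (0, 0))

-- body of 'if nd < dist[y][x]: dist[y][x] = nd; heappush(...)'
def pushA (cur : Int) (s : List (Int × Int × Int) × List (List Int)) (e : Int × Int × Int) :
    List (Int × Int × Int) × List (List Int) :=
  let nd := cur + e.2.2
  if nd < PySem.List.pyGetD (PySem.List.pyGetD s.2 e.1 []) e.2.1 pvINF then
    (s.1 ++ [(nd, e.1, e.2.1)],
     PySem.List.pySetD s.2 e.1 (PySem.List.pySetD (PySem.List.pyGetD s.2 e.1 []) e.2.1 nd))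
  else s

-- 'for iy, ix in move: res = r_move(...); if res is None: continue; …'
def relaxA (maps : List (List String)) (H W : Int) (sf : Nat) (ry rx cur : Int)
    (s : List (Int × Int × Int) × List (List Int)) (m : Int × Int) :
    List (Int × Int × Int) × List (List Int) :=
  match rmoveA maps H W m.1 m.2 sf ry rx 0 with
  | none => s
  | some e => pushA cur s e

def loopA (maps : List (List String)) (H W : Int) (sf : Nat) (goal : Int × Int) :
    Nat → List (Int × Int × Int) → List (List Int) → Int
  | 0, _, _ => -1
  | fuel + 1, pq, dist =>
    match pvPopMin pq with
    | none => -1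
    | some ((cur, ry, rx), pq') =>
      if cur ≠ PySem.List.pyGetD (PySem.List.pyGetD dist ry []) rx pvINF then
        loopA maps H W sf goal fuel pq' dist
      else if (ry, rx) = goal then cur
      else
        let s := moveA.foldl (relaxA maps H W sf ry rx cur) (pq', dist)
        loopA maps H W sf goal fuel s.1 s.2

def solution (maps : List (List String)) : Int :=
  let H : Int := PySem.List.len maps
  let W : Int := PySem.List.len (maps.headD [])
  let tg := scanTE maps H W
  let dist0 := List.replicate maps.length (List.replicate (maps.headD []).length pvINF)
  let dist1 := PySem.List.pySetD dist0 tg.1.1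
    (PySem.List.pySetD (PySem.List.pyGetD dist0 tg.1.1 []) tg.1.2 0)
  loopA maps H W (pvSlideFuel maps) tg.2 (pvFuel maps) [(0, tg.1.1, tg.1.2)] dist1

-- ===== PORT B =====
def dirsB : List (Int × Int) := [(0, 1), (0, -1), (-1, 0), (1, 0)]

def posB (H W : Int) : List (Int × Int) :=
  (PySem.List.pyRange 0 H 1).flatMap (fun i => (PySem.List.pyRange 0 W 1).map (fun j => (i, j)))

-- the cells visited while sliding, as a closed-form comprehension over range(1, n+1)
def rayB (H W y x dy dx : Int) : List (Int × Int) :=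
  let n : Int := if dx ≠ 0 then (if dx > 0 then W - 1 - x else x) else (if dy > 0 then H - 1 - y else y)
  (PySem.List.pyRange 1 (n + 1) 1).map (fun k => (y + dy * k, x + dx * k))

-- scan of one ray: first H/R/E decides; digits accumulate
def edgeB (maps : List (List String)) :
    List (Int × Int) → Int → Int → Int → Option (Int × Int × Int)
  | [], _, _, _ => none
  | (ny, nx) :: rest, py, px, cost =>
    let c := pvCell maps ny nx
    if c == "H" then none
    else if c == "R" then some (py, px, cost)
    else if c == "E" then some (ny, nx, cost)
    else if pvStrLe "0" c && pvStrLe c "9" then edgeB maps rest ny nx (cost + pvOrd0 c)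
    else edgeB maps rest ny nx cost

-- the flat edge list: every slide simulated once, up front; entries ((u), (v), w)
def edgesB (maps : List (List String)) (H W : Int) :
    List ((Int × Int) × (Int × Int) × Int) :=
  (posB H W).flatMap (fun p =>
    dirsB.filterMap (fun m =>
      (edgeB maps (rayB H W p.1 p.2 m.1 m.2) p.1 p.2 0).map (fun e => (p, (e.1, e.2.1), e.2.2))))

-- one Bellman-Ford round: 'new = dict(dist); for u, v, w in edges: if dist[u]+w < new[v]: new[v] = dist[u]+w'
def roundB (edges : List ((Int × Int) × (Int × Int) × Int))
    (dist : PySem.Dict (Int × Int) Int) : PySem.Dict (Int × Int) Int :=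
  edges.foldl (fun n e =>
    if dist.getD e.1 pvINF + e.2.2 < n.getD e.2.1 pvINF then
      n.insert e.2.1 (dist.getD e.1 pvINF + e.2.2)
    else n) dist

-- 'while True: … if new == dist: break; dist = new'.  Python's dict == ignores order, but
-- dist and new always carry the keys in the same (position-list) order, so '=' is exact here.
def bellLoop (edges : List ((Int × Int) × (Int × Int) × Int)) :
    Nat → PySem.Dict (Int × Int) Int → PySem.Dict (Int × Int) Int
  | 0, d => d
  | fuel + 1, d =>
    let n := roundB edges d
    if n = d then d else bellLoop edges fuel n

-- fuel for the Bellman loop (each round that changes anything strictly decreases the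
-- label sum, which starts below H*W*10^18; proved sufficient below)
def pvBellFuel (maps : List (List String)) : Nat :=
  maps.length * (maps.headD []).length * (10 ^ 18) + 1

def solution_alt (maps : List (List String)) : Int :=
  let H : Int := PySem.List.len maps
  let W : Int := PySem.List.len (maps.headD [])
  let ts := (posB H W).filter (fun p => pvCell maps p.1 p.2 == "T")
  let es := (posB H W).filter (fun p => pvCell maps p.1 p.2 == "E")
  let tera := ts.getLast?.getD (0, 0)
  let goal := es.getLast?.getD (0, 0)
  let edges := edgesB maps H W
  let d0 := (posB H W).foldl (fun d p => d.insert p (if p = tera then 0 else pvINF))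
    PySem.Dict.empty
  let dF := bellLoop edges (pvBellFuel maps) d0
  let dg := dF.getD goal pvINF
  if dg < pvINF then dg else -1

-- ===== PRECONDITION & SPEC =====
-- Pre_ excludes: the empty grid / an empty first row and rows shorter than the first
-- (A's scan or indexing raises IndexError), and grids containing a cell that compares
-- like a digit ('0' <= c <= '9' lexicographically) but is not a single character — on
-- such a cell ord() raises TypeError when A's lazy search reaches it, while B's
-- up-front edge table touches every cell, so B raises where A may still return.
def Pre_solution (maps : List (List String)) : Prop :=
  maps ≠ [] ∧ 1 ≤ (maps.headD []).length ∧
  (∀ r ∈ maps, (maps.headD []).length ≤ r.length) ∧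
  (∀ r ∈ maps, ∀ c ∈ r.take (maps.headD []).length,
    ¬(pvStrLe "0" c = true ∧ pvStrLe c "9" = true ∧ PySem.Str.len c ≠ 1))
instance (maps : List (List String)) : Decidable (Pre_solution maps) := by
  unfold Pre_solution; infer_instance

def pvWitness_solution : List (List String) :=
  [["T", "1", "E"], ["H", "R", "0"]]

def Spec_solution (maps : List (List String)) (out : Int) : Prop := out = solution_alt maps
instance (maps : List (List String)) (out : Int) : Decidable (Spec_solution maps out) := by
  unfold Spec_solution; infer_instance

-- ===== CLAIM (what is proved, stated in full; the proofs are below) =====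
def Claim_equal_solution : Prop :=
  ∀ (maps : List (List String)), Dom_solution maps → Pre_solution maps →
    Spec_solution maps (solution maps)

-- ===== LEMMAS AND PROOFS =====

-- ---------- generic loop-shape lemmas ----------
theorem pvFoldlMatchFilterMap {α β σ : Type} (l : List α) (f : α → Option β)
    (g : σ → β → σ) (init : σ) :
    l.foldl (fun s m => match f m with | none => s | some e => g s e) init =
      (l.filterMap f).foldl g init := by
  induction l generalizing init with
  | nil => rfl
  | cons h t ih =>
    simp only [List.filterMap_cons]
    cases hf : f h <;> simp [List.foldl_cons, hf, ih]

theorem pvFoldlOverwrite {α : Type} (l : List α) (P : α → Bool) (d : α) :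
    l.foldl (fun a p => if P p then p else a) d = (l.filter P).getLast?.getD d := by
  induction l generalizing d with
  | nil => rfl
  | cons h t ih =>
    simp only [List.foldl_cons, List.filter_cons]
    by_cases hp : P h
    · simp only [hp, if_true, ih]
      cases hft : t.filter P with
      | nil => simp
      | cons b l =>
        rcases hsome : (b :: l).getLast? with _ | z
        · simp at hsome
        · simp [List.getLast?_cons_cons, hsome]
    · simp only [hp, if_false, ih, Bool.false_eq_true]

theorem pvFoldlNested {α β σ : Type} (l : List α) (f : α → List β) (g : σ → β → σ) (init : σ) :
    l.foldl (fun s a => (f a).foldl g s) init = (l.flatMap f).foldl g init := by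
  induction l generalizing init with
  | nil => rfl
  | cons h t ih => simp [List.flatMap_cons, List.foldl_append, ih]

-- ---------- pvPopMin ----------
theorem pvLex3_le_of_not {a b : Int × Int × Int} (h : ¬ pvLex3 a b = true) : b.1 ≤ a.1 := by
  simp only [pvLex3, Bool.or_eq_true, Bool.and_eq_true, decide_eq_true_eq, beq_iff_eq] at h
  omega

theorem pvFoldlMin_spec (t : List (Int × Int × Int)) (a : Int × Int × Int) :
    (t.foldl (fun acc e => if pvLex3 e acc then e else acc) a) ∈ a :: t ∧
    (t.foldl (fun acc e => if pvLex3 e acc then e else acc) a).1 ≤ a.1 ∧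
    (∀ e ∈ t, (t.foldl (fun acc e => if pvLex3 e acc then e else acc) a).1 ≤ e.1) := by
  induction t generalizing a with
  | nil => exact ⟨by simp, le_refl _, by simp⟩
  | cons b t ih =>
    simp only [List.foldl_cons]
    by_cases hb : pvLex3 b a = true
    · rw [if_pos hb]
      obtain ⟨hmem, hle, hall⟩ := ih b
      have hba : b.1 ≤ a.1 := by
        simp only [pvLex3, Bool.or_eq_true, Bool.and_eq_true, decide_eq_true_eq,
          beq_iff_eq] at hb; omega
      refine ⟨?_, by omega, ?_⟩
      · rcases List.mem_cons.1 hmem with h | h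
        · rw [h]; simp
        · simp [h]
      · intro e he
        rcases List.mem_cons.1 he with rfl | h
        · omega
        · exact hall e h
    · rw [if_neg hb]
      obtain ⟨hmem, hle, hall⟩ := ih a
      have hba : a.1 ≤ b.1 := pvLex3_le_of_not hb
      refine ⟨?_, hle, ?_⟩
      · rcases List.mem_cons.1 hmem with h | h
        · rw [h]; simp
        · simp [h]
      · intro e he
        rcases List.mem_cons.1 he with rfl | h
        · omega
        · exact hall e h

theorem pvPopMin_spec {pq : List (Int × Int × Int)} {m : Int × Int × Int}
    {r : List (Int × Int × Int)} (h : pvPopMin pq = some (m, r)) :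
    m ∈ pq ∧ r = pq.erase m ∧ (∀ e ∈ pq, m.1 ≤ e.1) := by
  match pq with
  | [] => simp [pvPopMin] at h
  | a :: t =>
    simp only [pvPopMin] at h
    rw [Option.some.injEq, Prod.mk.injEq] at h
    obtain ⟨hm, hr⟩ := h
    obtain ⟨hmem, hle, hall⟩ := pvFoldlMin_spec t a
    subst hm
    refine ⟨hmem, hr.symm, ?_⟩
    intro e he
    rcases List.mem_cons.1 he with rfl | h
    · exact hle
    · exact hall e h

-- ---------- grid geometry ----------
def pvInb (H W : Int) (p : Int × Int) : Prop := 0 ≤ p.1 ∧ p.1 < H ∧ 0 ≤ p.2 ∧ p.2 < W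

theorem posB_mem {H W : Int} {p : Int × Int} (hp : p ∈ posB H W) : pvInb H W p := by
  simp only [posB, List.mem_flatMap, List.mem_map] at hp
  obtain ⟨i, hi, j, hj, rfl⟩ := hp
  rw [PySem.List.mem_pyRange_one] at hi hj
  exact ⟨hi.1, hi.2, hj.1, hj.2⟩

theorem mem_posB {H W : Int} {p : Int × Int} (hp : pvInb H W p) : p ∈ posB H W := by
  obtain ⟨h1, h2, h3, h4⟩ := hp
  simp only [posB, List.mem_flatMap, List.mem_map]
  exact ⟨p.1, by rw [PySem.List.mem_pyRange_one]; exact ⟨h1, h2⟩,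
    ⟨p.2, by rw [PySem.List.mem_pyRange_one]; exact ⟨h3, h4⟩, by simp⟩⟩

theorem posB_nodup (H W : Int) : (posB H W).Nodup := by
  rw [posB, List.nodup_flatMap]
  constructor
  · intro i _
    refine List.Nodup.map (fun a b h => by simpa using h) ?_
    rw [PySem.List.pyRange_one]
    exact List.Nodup.map (fun a b h => by omega) (List.nodup_range)
  · rw [PySem.List.pyRange_one]
    refine List.Pairwise.map _ ?_ (List.pairwise_lt_range)
    intro a b hab p hp hq
    simp only [List.mem_map] at hp hq
    obtain ⟨j1, _, rfl⟩ := hp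
    obtain ⟨j2, _, h2⟩ := hq
    have := congrArg Prod.fst h2
    simp only at this
    omega

theorem posB_length (H W : Int) : (posB H W).length = H.toNat * W.toNat := by
  rw [posB, List.length_flatMap]
  rw [PySem.List.pyRange_one]
  simp [Function.comp_def]

-- ---------- matrix distance array (A's dist) ----------
def pvDA (d : List (List Int)) (p : Int × Int) : Int :=
  PySem.List.pyGetD (PySem.List.pyGetD d p.1 []) p.2 pvINF

def pvSet (d : List (List Int)) (p : Int × Int) (nd : Int) : List (List Int) :=
  PySem.List.pySetD d p.1 (PySem.List.pySetD (PySem.List.pyGetD d p.1 []) p.2 nd)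

def pvGoodA (H W : Int) (dA : List (List Int)) : Prop :=
  (dA.length : Int) = H ∧ ∀ r ∈ dA, (r.length : Int) = W

theorem pvGoodA_update {H W : Int} {dA : List (List Int)} (hg : pvGoodA H W dA) {p : Int × Int}
    (hin : pvInb H W p) (nd : Int) : pvGoodA H W (pvSet dA p nd) := by
  obtain ⟨hy0, hyH, hx0, hxW⟩ := hin
  obtain ⟨hlen, hrows⟩ := hg
  unfold pvSet
  rw [PySem.List.pySetD_of_nonneg dA _ hy0, PySem.List.pySetD_of_nonneg _ _ hx0]
  refine ⟨by simpa using hlen, ?_⟩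
  intro r hr
  rcases List.mem_or_eq_of_mem_set hr with hmem | rfl
  · exact hrows r hmem
  · have hylt : p.1.toNat < dA.length := by omega
    have hget : PySem.List.pyGetD dA p.1 ([] : List Int) = dA[p.1.toNat] :=
      PySem.List.pyGetD_eq_getElem dA [] hy0 (by omega)
    rw [hget]
    simpa using hrows _ (List.getElem_mem hylt)

theorem pvDA_update {H W : Int} {dA : List (List Int)} (hg : pvGoodA H W dA) {p : Int × Int}
    (hin : pvInb H W p) (nd : Int) {q : Int × Int} (hq : pvInb H W q) :
    pvDA (pvSet dA p nd) q = if q = p then nd else pvDA dA q := by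
  obtain ⟨hy0, hyH, hx0, hxW⟩ := hin
  obtain ⟨hlen, hrows⟩ := hg
  obtain ⟨hy0', hyH', hx0', hxW'⟩ := hq
  have hylt : p.1.toNat < dA.length := by omega
  have hrowW : (dA[p.1.toNat].length : Int) = W := hrows _ (List.getElem_mem hylt)
  have hget : PySem.List.pyGetD dA p.1 ([] : List Int) = dA[p.1.toNat] :=
    PySem.List.pyGetD_eq_getElem dA [] hy0 (by omega)
  unfold pvSet pvDA
  rw [PySem.List.pySetD_of_nonneg dA _ hy0, hget, PySem.List.pySetD_of_nonneg _ _ hx0]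
  have hylt' : q.1.toNat < dA.length := by omega
  have hget' : PySem.List.pyGetD (dA.set p.1.toNat (dA[p.1.toNat].set p.2.toNat nd)) q.1
      ([] : List Int) = (dA.set p.1.toNat (dA[p.1.toNat].set p.2.toNat nd))[q.1.toNat]'(by
        simpa using hylt') :=
    PySem.List.pyGetD_eq_getElem _ [] hy0' (by simp; omega)
  rw [hget', List.getElem_set]
  have hxlt : p.2.toNat < dA[p.1.toNat].length := by omega
  by_cases hyy : p.1.toNat = q.1.toNat
  · rw [if_pos hyy]
    have hgx : PySem.List.pyGetD (dA[p.1.toNat].set p.2.toNat nd) q.2 pvINF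
        = (dA[p.1.toNat].set p.2.toNat nd)[q.2.toNat]'(by simp; omega) :=
      PySem.List.pyGetD_eq_getElem _ _ hx0' (by simp; omega)
    rw [hgx, List.getElem_set]
    by_cases hxx : p.2.toNat = q.2.toNat
    · rw [if_pos hxx, if_pos (by rw [Prod.ext_iff]; constructor <;> omega)]
    · rw [if_neg hxx, if_neg (by rw [Prod.ext_iff]; intro hc; omega)]
      have hgy' : PySem.List.pyGetD dA q.1 ([] : List Int) = dA[q.1.toNat]'hylt' :=
        PySem.List.pyGetD_eq_getElem dA [] hy0' (by omega)
      rw [hgy']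
      have hrw : dA[q.1.toNat]'hylt' = dA[p.1.toNat] := by congr 1; omega
      rw [hrw]
      exact (PySem.List.pyGetD_eq_getElem (dA[p.1.toNat]) pvINF hx0' (by omega)).symm ▸ rfl
  · rw [if_neg hyy, if_neg (by rw [Prod.ext_iff]; intro hc; omega)]
    have hgy' : PySem.List.pyGetD dA q.1 ([] : List Int) = dA[q.1.toNat]'hylt' :=
      PySem.List.pyGetD_eq_getElem dA [] hy0' (by omega)
    rw [hgy']

-- ---------- edges, reachability ----------
def adjList (maps : List (List String)) (H W : Int) (p : Int × Int) :
    List (Int × Int × Int) :=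
  dirsB.filterMap (fun m => edgeB maps (rayB H W p.1 p.2 m.1 m.2) p.1 p.2 0)

theorem edgesB_eq (maps : List (List String)) (H W : Int) :
    edgesB maps H W = (posB H W).flatMap (fun p =>
      (adjList maps H W p).map (fun e => (p, (e.1, e.2.1), e.2.2))) := by
  unfold edgesB adjList
  congr 1
  funext p
  rw [List.map_filterMap]

theorem mem_edgesB_iff {maps : List (List String)} {H W : Int} {u v : Int × Int} {w : Int} :
    (u, v, w) ∈ edgesB maps H W ↔
      u ∈ posB H W ∧ ∃ e ∈ adjList maps H W u, v = (e.1, e.2.1) ∧ w = e.2.2 := by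
  rw [edgesB_eq]
  constructor
  · intro h
    rw [List.mem_flatMap] at h
    obtain ⟨p, hp, hmem⟩ := h
    rw [List.mem_map] at hmem
    obtain ⟨e, he, heq⟩ := hmem
    simp only [Prod.mk.injEq] at heq
    obtain ⟨rfl, h2, h3⟩ := heq
    exact ⟨hp, e, he, h2.symm, h3.symm⟩
  · rintro ⟨hu, e, he, rfl, rfl⟩
    rw [List.mem_flatMap]
    exact ⟨u, hu, List.mem_map.2 ⟨e, he, rfl⟩⟩

inductive pvReach (maps : List (List String)) (H W : Int) (src : Int × Int) :
    (Int × Int) → Int → Prop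
  | base : pvReach maps H W src src 0
  | step {u : Int × Int} {c : Int} {v : Int × Int} {w : Int} :
      pvReach maps H W src u c → (u, v, w) ∈ edgesB maps H W →
      pvReach maps H W src v (c + w)

def pvLeastR (P : Int → Prop) (c : Int) : Prop := P c ∧ ∀ c', P c' → c ≤ c'

-- the common answer specification: least reachable cost below INF, else -1
def pvAns (maps : List (List String)) (H W : Int) (tera goal : Int × Int) (r : Int) : Prop :=
  (∃ c, pvLeastR (pvReach maps H W tera goal) c ∧ c < pvINF ∧ r = c) ∨
  ((¬ ∃ c, pvReach maps H W tera goal c ∧ c < pvINF) ∧ r = -1)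

theorem pvAns_unique {maps : List (List String)} {H W : Int} {tera goal : Int × Int}
    {r r' : Int} (h : pvAns maps H W tera goal r) (h' : pvAns maps H W tera goal r') :
    r = r' := by
  rcases h with ⟨c, ⟨hc, hmin⟩, hlt, rfl⟩ | ⟨hno, rfl⟩ <;>
    rcases h' with ⟨c', ⟨hc', hmin'⟩, hlt', rfl⟩ | ⟨hno', rfl⟩
  · exact le_antisymm (hmin _ hc') (hmin' _ hc)
  · exact absurd ⟨_, hc, hlt⟩ hno'
  · exact absurd ⟨_, hc', hlt'⟩ hno
  · rfl


-- ---------- slides: A's r_move equals B's ray scan ----------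
def raySpec (H W dy dx : Int) : Nat → Int → Int → List (Int × Int)
  | 0, _, _ => []
  | f + 1, y, x =>
    if 0 ≤ y + dy ∧ y + dy < H ∧ 0 ≤ x + dx ∧ x + dx < W then
      (y + dy, x + dx) :: raySpec H W dy dx f (y + dy) (x + dx)
    else []

theorem raySpec_inb {H W dy dx : Int} : ∀ (f : Nat) (y x : Int),
    ∀ p ∈ raySpec H W dy dx f y x, pvInb H W p := by
  intro f
  induction f with
  | zero => intro y x p hp; simp [raySpec] at hp
  | succ f ih =>
    intro y x p hp
    simp only [raySpec] at hp
    split_ifs at hp with hc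
    · rcases List.mem_cons.1 hp with rfl | hp
      · exact ⟨hc.1, hc.2.1, hc.2.2.1, hc.2.2.2⟩
      · exact ih _ _ p hp
    · simp at hp

theorem ray_gen (H W dy dx : Int) (nF : Int → Int → Int)
    (hn : ∀ y x : Int, pvInb H W (y, x) →
      ((0 ≤ y + dy ∧ y + dy < H ∧ 0 ≤ x + dx ∧ x + dx < W) ↔ 1 ≤ nF y x))
    (hstep : ∀ y x : Int, nF (y + dy) (x + dx) = nF y x - 1) :
    ∀ (f : Nat) (y x : Int), pvInb H W (y, x) → (nF y x).toNat < f →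
    (PySem.List.pyRange 1 (nF y x + 1) 1).map (fun k => (y + dy * k, x + dx * k)) =
      raySpec H W dy dx f y x := by
  intro f
  induction f with
  | zero => intro y x _ hf; omega
  | succ f ih =>
    intro y x hin hf
    by_cases hc : 0 ≤ y + dy ∧ y + dy < H ∧ 0 ≤ x + dx ∧ x + dx < W
    · have hn1 : 1 ≤ nF y x := (hn y x hin).1 hc
      rw [raySpec, if_pos hc]
      rw [PySem.List.pyRange_one_cons (by omega)]
      rw [List.map_cons]
      have hhead : (y + dy * 1, x + dx * 1) = (y + dy, x + dx) := by
        rw [Prod.mk.injEq]; constructor <;> ring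
      rw [hhead]
      congr 1
      have h11 : (1 : Int) + 1 = 2 := by norm_num
      rw [h11]
      have hshift : PySem.List.pyRange 2 (nF y x + 1) 1 =
          (PySem.List.pyRange 1 (nF (y + dy) (x + dx) + 1) 1).map (fun k => k + 1) := by
        rw [hstep]
        simp only [PySem.List.pyRange_one]
        rw [List.map_map]
        have hb : (nF y x + 1 - 2).toNat = (nF y x - 1 + 1 - 1).toNat := by omega
        rw [hb]
        apply List.map_congr_left
        intro a _
        simp only [Function.comp]
        omega
      rw [hshift, List.map_map]
      have hfun : ((fun k => (y + dy * k, x + dx * k)) ∘ (fun k => k + 1)) =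
          (fun k => (y + dy + dy * k, x + dx + dx * k)) := by
        funext k
        simp only [Function.comp]
        rw [Prod.mk.injEq]; constructor <;> ring
      rw [hfun]
      exact ih (y + dy) (x + dx) ⟨hc.1, hc.2.1, hc.2.2.1, hc.2.2.2⟩ (by rw [hstep]; omega)
    · have hn0 : nF y x < 1 := by
        by_contra hcon
        exact hc ((hn y x hin).2 (by omega))
      rw [raySpec, if_neg hc, PySem.List.pyRange_one_eq_nil (by omega), List.map_nil]

theorem rayB_eq_raySpec {H W : Int} {m : Int × Int} (hm : m ∈ dirsB) :
    ∀ (f : Nat) (y x : Int), pvInb H W (y, x) →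
    (if m.2 ≠ 0 then (if m.2 > 0 then W - 1 - x else x) else (if m.1 > 0 then H - 1 - y else y)).toNat < f →
    rayB H W y x m.1 m.2 = raySpec H W m.1 m.2 f y x := by
  intro f y x hin hf
  simp only [dirsB, List.mem_cons, List.not_mem_nil, or_false] at hm
  rcases hm with rfl | rfl | rfl | rfl
  · simp only [rayB, ne_eq, one_ne_zero, not_false_iff, if_true, if_pos (by norm_num : (1:Int) > 0)] at *
    exact ray_gen H W 0 1 (fun y x => W - 1 - x)
      (fun y x h => by obtain ⟨a, b, c, d⟩ := h; beta_reduce; omega)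
      (fun y x => by beta_reduce; omega) f y x hin (by beta_reduce; first | omega | (norm_num at hf; omega))
  · simp only [rayB, ne_eq, neg_eq_zero, one_ne_zero, not_false_iff, if_true,
      if_neg (by norm_num : ¬((-1:Int) > 0))] at *
    exact ray_gen H W 0 (-1) (fun y x => x)
      (fun y x h => by obtain ⟨a, b, c, d⟩ := h; beta_reduce; omega)
      (fun y x => by beta_reduce; omega) f y x hin (by beta_reduce; first | omega | (norm_num at hf; omega))
  · simp only [rayB, ne_eq, not_not, if_neg (by norm_num : ¬((0:Int) ≠ 0)),
      if_neg (by norm_num : ¬((-1:Int) > 0))] at *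
    exact ray_gen H W (-1) 0 (fun y x => y)
      (fun y x h => by obtain ⟨a, b, c, d⟩ := h; beta_reduce; omega)
      (fun y x => by beta_reduce; omega) f y x hin (by beta_reduce; first | omega | (norm_num at hf; omega))
  · simp only [rayB, ne_eq, not_not, if_neg (by norm_num : ¬((0:Int) ≠ 0)),
      if_pos (by norm_num : (1:Int) > 0)] at *
    exact ray_gen H W 1 0 (fun y x => H - 1 - y)
      (fun y x h => by obtain ⟨a, b, c, d⟩ := h; beta_reduce; omega)
      (fun y x => by beta_reduce; omega) f y x hin (by beta_reduce; first | omega | (norm_num at hf; omega))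

theorem rmoveA_eq_edgeB (maps : List (List String)) (H W my mx : Int) :
    ∀ (f : Nat) (y x dis : Int),
    rmoveA maps H W my mx f y x dis = edgeB maps (raySpec H W my mx f y x) y x dis := by
  intro f
  induction f with
  | zero => intro y x dis; rfl
  | succ f ih =>
    intro y x dis
    simp only [rmoveA, raySpec]
    by_cases hb : 0 ≤ y + my ∧ y + my < H ∧ 0 ≤ x + mx ∧ x + mx < W
    · rw [if_neg (by omega), if_pos hb]
      simp only [edgeB, ih]
    · rw [if_pos (by omega), if_neg hb]
      rfl

theorem edgeB_inb {maps : List (List String)} {H W : Int} :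
    ∀ (cells : List (Int × Int)) (py px cost : Int), pvInb H W (py, px) →
    (∀ p ∈ cells, pvInb H W p) →
    ∀ e, edgeB maps cells py px cost = some e → pvInb H W (e.1, e.2.1) := by
  intro cells
  induction cells with
  | nil => intro py px cost _ _ e he; simp [edgeB] at he
  | cons c rest ih =>
    intro py px cost hstart hcells e he
    obtain ⟨ny, nx⟩ := c
    have hc : pvInb H W (ny, nx) := hcells _ (by simp)
    simp only [edgeB] at he
    by_cases h1 : pvCell maps ny nx == "H"
    · simp [h1] at he
    · by_cases h2 : pvCell maps ny nx == "R"
      · simp [h1, h2] at he; subst he; exact hstart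
      · by_cases h3 : pvCell maps ny nx == "E"
        · simp [h1, h2, h3] at he; subst he; exact hc
        · by_cases h4 : pvStrLe "0" (pvCell maps ny nx) && pvStrLe (pvCell maps ny nx) "9"
          · simp only [h1, h2, h3, h4, if_false, if_true, Bool.false_eq_true] at he
            exact ih ny nx _ hc (fun p hp => hcells p (by simp [hp])) e he
          · simp only [h1, h2, h3, h4, if_false, Bool.false_eq_true] at he
            exact ih ny nx _ hc (fun p hp => hcells p (by simp [hp])) e he

-- ---------- the context extracted from Pre_ and the edge facts ----------
def pvCtx (maps : List (List String)) (H W : Int) : Prop :=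
  H = (maps.length : Int) ∧ W = ((maps.headD []).length : Int) ∧ 1 ≤ maps.length ∧
  1 ≤ (maps.headD []).length ∧ (∀ r ∈ maps, (maps.headD []).length ≤ r.length) ∧
  (∀ r ∈ maps, ∀ c ∈ r.take (maps.headD []).length,
    ¬(pvStrLe "0" c = true ∧ pvStrLe c "9" = true ∧ PySem.Str.len c ≠ 1))

theorem ctx_digit {maps : List (List String)} {H W : Int} (hctx : pvCtx maps H W)
    {y x : Int} (hin : pvInb H W (y, x))
    (hd : (pvStrLe "0" (pvCell maps y x) && pvStrLe (pvCell maps y x) "9") = true) :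
    0 ≤ pvOrd0 (pvCell maps y x) := by
  obtain ⟨hH, hW, h1, h2, hrows, hdig⟩ := hctx
  obtain ⟨hy0, hyH, hx0, hxW⟩ := hin
  have hy : y.toNat < maps.length := by omega
  set r := PySem.List.pyGetD maps y ([] : List String) with hrdefn
  have hrdef : r = maps[y.toNat] := PySem.List.pyGetD_eq_getElem maps [] hy0 (by omega)
  have hrmem : r ∈ maps := by rw [hrdef]; exact List.getElem_mem hy
  have hWle := hrows _ hrmem
  have hx : x.toNat < (maps.headD []).length := by omega
  have hcell : pvCell maps y x = r[x.toNat]'(by omega) := by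
    unfold pvCell
    rw [← hrdefn]
    exact PySem.List.pyGetD_eq_getElem r "" hx0 (by omega)
  have hmem : r[x.toNat]'(by omega) ∈ r.take (maps.headD []).length := by
    have hlt : x.toNat < (r.take (maps.headD []).length).length := by
      rw [List.length_take]; omega
    have hgt : (r.take (maps.headD []).length)[x.toNat]'hlt = r[x.toNat]'(by omega) :=
      List.getElem_take
    rw [← hgt]
    exact List.getElem_mem hlt
  have hnd := hdig _ hrmem _ hmem
  rw [Bool.and_eq_true] at hd
  rw [hcell] at hd ⊢
  set c := r[x.toNat]'(by omega) with hc
  have hlen : PySem.Str.len c = 1 := by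
    by_contra hne
    exact hnd ⟨hd.1, hd.2, hne⟩
  rw [PySem.Str.len_eq] at hlen
  obtain ⟨ch, hch⟩ : ∃ ch, c.toList = [ch] := by
    rcases hcl : c.toList with _ | ⟨a, t⟩
    · rw [hcl] at hlen; simp at hlen
    · rw [hcl] at hlen; simp at hlen
      exact ⟨a, by first | (rw [hcl, hlen]) | (rw [hlen]) | simp [hlen]⟩
  have hle := hd.1
  unfold pvStrLe at hle
  rw [hch] at hle
  have h0 : "0".toList = ['0'] := rfl
  rw [h0] at hle
  simp only [pvLexLe, Bool.or_eq_true, Bool.and_eq_true, decide_eq_true_eq, beq_iff_eq] at hle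
  unfold pvOrd0
  rw [hch]
  simp only [List.headD_cons]
  have h48 : ('0').toNat = 48 := by decide
  rcases hle with h | ⟨h, _⟩
  · omega
  · rw [← h]; omega

theorem ctx_ray_eq {maps : List (List String)} {H W : Int} (hctx : pvCtx maps H W)
    {p : Int × Int} (hin : pvInb H W p) {m : Int × Int} (hm : m ∈ dirsB) :
    rayB H W p.1 p.2 m.1 m.2 = raySpec H W m.1 m.2 (pvSlideFuel maps) p.1 p.2 := by
  obtain ⟨hH, hW, h1, h2, _, _⟩ := hctx
  refine rayB_eq_raySpec hm _ p.1 p.2 hin ?_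
  obtain ⟨a, b, c, d⟩ := hin
  unfold pvSlideFuel
  simp only [dirsB, List.mem_cons, List.not_mem_nil, or_false] at hm
  rcases hm with rfl | rfl | rfl | rfl <;> norm_num <;>
    simp only [List.headD_eq_head?_getD] at hH hW ⊢ <;> omega

theorem ctx_adj_inb {maps : List (List String)} {H W : Int} (hctx : pvCtx maps H W)
    {p : Int × Int} (hin : pvInb H W p) {e : Int × Int × Int}
    (he : e ∈ adjList maps H W p) : pvInb H W (e.1, e.2.1) := by
  obtain ⟨m, hm, hedge⟩ := List.mem_filterMap.1 he
  refine edgeB_inb (rayB H W p.1 p.2 m.1 m.2) p.1 p.2 0 hin ?_ e hedge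
  intro q hq
  rw [ctx_ray_eq hctx hin hm] at hq
  exact raySpec_inb _ p.1 p.2 q hq

theorem edgeB_cost_mono {maps : List (List String)} {H W : Int} (hctx : pvCtx maps H W) :
    ∀ (cells : List (Int × Int)) (py px cost : Int),
    (∀ p ∈ cells, pvInb H W p) →
    ∀ e, edgeB maps cells py px cost = some e → cost ≤ e.2.2 := by
  intro cells
  induction cells with
  | nil => intro py px cost _ e he; simp [edgeB] at he
  | cons c rest ih =>
    intro py px cost hcells e he
    obtain ⟨ny, nx⟩ := c
    have hc : pvInb H W (ny, nx) := hcells _ (by simp)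
    simp only [edgeB] at he
    by_cases h1 : pvCell maps ny nx == "H"
    · simp [h1] at he
    · by_cases h2 : pvCell maps ny nx == "R"
      · simp [h1, h2] at he
        rw [← he]
      · by_cases h3 : pvCell maps ny nx == "E"
        · simp [h1, h2, h3] at he
          rw [← he]
        · by_cases h4 : pvStrLe "0" (pvCell maps ny nx) && pvStrLe (pvCell maps ny nx) "9"
          · simp only [h1, h2, h3, h4, if_false, if_true, Bool.false_eq_true] at he
            have := ih ny nx _ (fun p hp => hcells p (by simp [hp])) e he
            have h0 := ctx_digit hctx hc h4
            omega
          · simp only [h1, h2, h3, h4, if_false, Bool.false_eq_true] at he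
            exact ih ny nx _ (fun p hp => hcells p (by simp [hp])) e he

theorem ctx_adj_w_nonneg {maps : List (List String)} {H W : Int} (hctx : pvCtx maps H W)
    {p : Int × Int} (hin : pvInb H W p) {e : Int × Int × Int}
    (he : e ∈ adjList maps H W p) : 0 ≤ e.2.2 := by
  obtain ⟨m, hm, hedge⟩ := List.mem_filterMap.1 he
  refine edgeB_cost_mono hctx (rayB H W p.1 p.2 m.1 m.2) p.1 p.2 0 ?_ e hedge
  intro q hq
  rw [ctx_ray_eq hctx hin hm] at hq
  exact raySpec_inb _ p.1 p.2 q hq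

theorem ctx_edge_inb {maps : List (List String)} {H W : Int} (hctx : pvCtx maps H W)
    {u v : Int × Int} {w : Int} (he : (u, v, w) ∈ edgesB maps H W) : pvInb H W v := by
  obtain ⟨hu, e, hee, rfl, rfl⟩ := mem_edgesB_iff.1 he
  exact ctx_adj_inb hctx (posB_mem hu) hee

theorem ctx_edge_w_nonneg {maps : List (List String)} {H W : Int} (hctx : pvCtx maps H W)
    {u v : Int × Int} {w : Int} (he : (u, v, w) ∈ edgesB maps H W) : 0 ≤ w := by
  obtain ⟨hu, e, hee, rfl, rfl⟩ := mem_edgesB_iff.1 he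
  exact ctx_adj_w_nonneg hctx (posB_mem hu) hee

theorem reach_nonneg {maps : List (List String)} {H W : Int} (hctx : pvCtx maps H W)
    {src v : Int × Int} {c : Int} (h : pvReach maps H W src v c) : 0 ≤ c := by
  induction h with
  | base => omega
  | step _ he ih => have := ctx_edge_w_nonneg hctx he; omega

-- ---------- B side: Bellman-Ford rounds reach the least-cost fixpoint ----------
def pvBF (dist : PySem.Dict (Int × Int) Int) (es : List ((Int × Int) × (Int × Int) × Int))
    (n : PySem.Dict (Int × Int) Int) : PySem.Dict (Int × Int) Int :=
  es.foldl (fun n e =>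
    if dist.getD e.1 pvINF + e.2.2 < n.getD e.2.1 pvINF then
      n.insert e.2.1 (dist.getD e.1 pvINF + e.2.2)
    else n) n

theorem roundB_eq_pvBF (es : List ((Int × Int) × (Int × Int) × Int))
    (dist : PySem.Dict (Int × Int) Int) : roundB es dist = pvBF dist es dist := rfl

theorem pvBF_le (dist : PySem.Dict (Int × Int) Int) :
    ∀ (es : List ((Int × Int) × (Int × Int) × Int)) (n : PySem.Dict (Int × Int) Int)
      (p : Int × Int), (pvBF dist es n).getD p pvINF ≤ n.getD p pvINF := by
  intro es
  induction es with
  | nil => intro n p; exact le_refl _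
  | cons e t ih =>
    intro n p
    show (pvBF dist t _).getD p pvINF ≤ _
    by_cases hf : dist.getD e.1 pvINF + e.2.2 < n.getD e.2.1 pvINF
    · simp only [pvBF, List.foldl_cons, if_pos hf]
      refine le_trans (ih _ p) ?_
      rw [PySem.Dict.getD_insert]
      split_ifs with hp
      · subst hp; omega
      · exact le_refl _
    · simp only [pvBF, List.foldl_cons, if_neg hf]
      exact ih n p

theorem pvBF_edge (dist : PySem.Dict (Int × Int) Int) :
    ∀ (es : List ((Int × Int) × (Int × Int) × Int)) (n : PySem.Dict (Int × Int) Int),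
      ∀ e ∈ es, (pvBF dist es n).getD e.2.1 pvINF ≤ dist.getD e.1 pvINF + e.2.2 := by
  intro es
  induction es with
  | nil => intro n e he; simp at he
  | cons a t ih =>
    intro n e he
    rcases List.mem_cons.1 he with rfl | he'
    · by_cases hf : dist.getD e.1 pvINF + e.2.2 < n.getD e.2.1 pvINF
      · simp only [pvBF, List.foldl_cons, if_pos hf]
        refine le_trans (pvBF_le dist t _ e.2.1) ?_
        rw [PySem.Dict.getD_insert, if_pos rfl]
      · simp only [pvBF, List.foldl_cons, if_neg hf]
        exact le_trans (pvBF_le dist t n e.2.1) (by omega)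
    · by_cases hf : dist.getD a.1 pvINF + a.2.2 < n.getD a.2.1 pvINF
      · simp only [pvBF, List.foldl_cons, if_pos hf]
        exact ih _ e he'
      · simp only [pvBF, List.foldl_cons, if_neg hf]
        exact ih n e he'

theorem pvBF_keys (dist : PySem.Dict (Int × Int) Int) (K : List (Int × Int)) :
    ∀ (es : List ((Int × Int) × (Int × Int) × Int)), (∀ e ∈ es, e.2.1 ∈ K) →
    ∀ (n : PySem.Dict (Int × Int) Int), n.keys = K → (pvBF dist es n).keys = K := by
  intro es
  induction es with
  | nil => intro _ n h; exact h
  | cons a t ih =>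
    intro hK n hn
    by_cases hf : dist.getD a.1 pvINF + a.2.2 < n.getD a.2.1 pvINF
    · simp only [pvBF, List.foldl_cons, if_pos hf]
      refine ih (fun e he => hK e (by simp [he])) _ ?_
      rw [PySem.Dict.keys_insert_of_contains _ _ (by
        rw [PySem.Dict.contains_iff_mem_keys, hn]; exact hK a (by simp))]
      exact hn
    · simp only [pvBF, List.foldl_cons, if_neg hf]
      exact ih (fun e he => hK e (by simp [he])) n hn

-- labels are INF or genuine walk costs
def pvLab (maps : List (List String)) (H W : Int) (tera : Int × Int)
    (d : PySem.Dict (Int × Int) Int) : Prop :=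
  ∀ p : Int × Int, d.getD p pvINF = pvINF ∨
    (0 ≤ d.getD p pvINF ∧ d.getD p pvINF < pvINF ∧
      pvReach maps H W tera p (d.getD p pvINF))

theorem pvBF_lab {maps : List (List String)} {H W : Int} (hctx : pvCtx maps H W)
    {tera : Int × Int} {dist : PySem.Dict (Int × Int) Int}
    (hld : pvLab maps H W tera dist) :
    ∀ (es : List ((Int × Int) × (Int × Int) × Int)), (∀ e ∈ es, e ∈ edgesB maps H W) →
    ∀ (n : PySem.Dict (Int × Int) Int), pvLab maps H W tera n →
    pvLab maps H W tera (pvBF dist es n) := by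
  intro es
  induction es with
  | nil => intro _ n h; exact h
  | cons a t ih =>
    intro hes n hn
    by_cases hf : dist.getD a.1 pvINF + a.2.2 < n.getD a.2.1 pvINF
    · simp only [pvBF, List.foldl_cons, if_pos hf]
      refine ih (fun e he => hes e (by simp [he])) _ ?_
      have hamem : a ∈ edgesB maps H W := hes a (by simp)
      have hamem' : (a.1, a.2.1, a.2.2) ∈ edgesB maps H W := by
        have : (a.1, a.2.1, a.2.2) = a := rfl
        rw [this]; exact hamem
      have hw : 0 ≤ a.2.2 := ctx_edge_w_nonneg hctx hamem'
      have hnv : n.getD a.2.1 pvINF ≤ pvINF := by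
        rcases hn a.2.1 with h | ⟨_, h, _⟩ <;> omega
      have hu : ¬ dist.getD a.1 pvINF = pvINF := by intro h; rw [h] at hf; omega
      obtain ⟨hu0, huf, hur⟩ := (hld a.1).resolve_left hu
      intro p
      rw [PySem.Dict.getD_insert]
      split_ifs with hp
      · subst hp
        right
        refine ⟨by omega, by omega, ?_⟩
        exact pvReach.step hur hamem'
      · exact hn p
    · simp only [pvBF, List.foldl_cons, if_neg hf]
      exact ih (fun e he => hes e (by simp [he])) n hn

-- extensionality: same canonical keys + equal lookups = equal dicts
theorem pvDictExt {d d' : PySem.Dict (Int × Int) Int} (hk : d.keys = d'.keys)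
    (hnd : d.keys.Nodup) (h : ∀ p ∈ d.keys, d.getD p pvINF = d'.getD p pvINF) :
    d = d' := by
  apply PySem.Dict.ext
  rw [PySem.Dict.items_eq_map_keys d hnd pvINF,
    PySem.Dict.items_eq_map_keys d' (hk ▸ hnd) pvINF, ← hk]
  apply List.map_congr_left
  intro p hp
  rw [h p hp]

def pvMu (H W : Int) (d : PySem.Dict (Int × Int) Int) : Nat :=
  ((posB H W).map (fun p => (d.getD p pvINF).toNat)).sum

theorem pvMu_lt {maps : List (List String)} {H W : Int} {tera : Int × Int}
    {d n : PySem.Dict (Int × Int) Int} (hkd : d.keys = posB H W) (hkn : n.keys = posB H W)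
    (hle : ∀ p, n.getD p pvINF ≤ d.getD p pvINF) (hln : pvLab maps H W tera n)
    (hld : pvLab maps H W tera d) (hne : n ≠ d) : pvMu H W n < pvMu H W d := by
  have hstrict : ∃ p ∈ posB H W, n.getD p pvINF < d.getD p pvINF := by
    by_contra hcon
    push_neg at hcon
    apply hne
    refine pvDictExt (by rw [hkn, hkd]) (by rw [hkn]; exact posB_nodup H W) ?_
    intro p hp
    rw [hkn] at hp
    exact le_antisymm (hle p) (hcon p hp)
  obtain ⟨p0, hp0, hplt⟩ := hstrict
  refine List.sum_lt_sum _ _ (fun p _ => Int.toNat_le_toNat (hle p)) ⟨p0, hp0, ?_⟩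
  have h0 : 0 ≤ n.getD p0 pvINF := by
    rcases hln p0 with h | ⟨h, _, _⟩
    · rw [h] at hplt
      have : d.getD p0 pvINF ≤ pvINF := by
        rcases hld p0 with h' | ⟨_, h', _⟩ <;> omega
      omega
    · exact h
  omega

theorem bellLoop_spec {maps : List (List String)} {H W : Int} (hctx : pvCtx maps H W)
    {tera : Int × Int} :
    ∀ (f : Nat) (d : PySem.Dict (Int × Int) Int), d.keys = posB H W →
      pvLab maps H W tera d → pvMu H W d < f →
      (∀ p, (bellLoop (edgesB maps H W) f d).getD p pvINF ≤ d.getD p pvINF) ∧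
      pvLab maps H W tera (bellLoop (edgesB maps H W) f d) ∧
      (∀ e ∈ edgesB maps H W,
        (bellLoop (edgesB maps H W) f d).getD e.2.1 pvINF ≤
          (bellLoop (edgesB maps H W) f d).getD e.1 pvINF + e.2.2) := by
  intro f
  induction f with
  | zero => intro d _ _ hmu; omega
  | succ f ih =>
    intro d hk hl hmu
    have hkeysn : (roundB (edgesB maps H W) d).keys = posB H W := by
      rw [roundB_eq_pvBF]
      exact pvBF_keys d (posB H W) _
        (fun e he => mem_posB (ctx_edge_inb hctx (show (e.1, e.2.1, e.2.2) ∈ _ by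
          exact (show (e.1, e.2.1, e.2.2) = e from rfl) ▸ he))) d hk
    have hlabn : pvLab maps H W tera (roundB (edgesB maps H W) d) := by
      rw [roundB_eq_pvBF]
      exact pvBF_lab hctx hl _ (fun e he => he) d hl
    have hlen : ∀ p, (roundB (edgesB maps H W) d).getD p pvINF ≤ d.getD p pvINF := by
      intro p; rw [roundB_eq_pvBF]; exact pvBF_le d _ d p
    have hunf : bellLoop (edgesB maps H W) (f + 1) d =
        if roundB (edgesB maps H W) d = d then d
        else bellLoop (edgesB maps H W) f (roundB (edgesB maps H W) d) := rfl
    rw [hunf]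
    by_cases heq : roundB (edgesB maps H W) d = d
    · rw [if_pos heq]
      refine ⟨fun p => le_refl _, hl, ?_⟩
      intro e he
      have := pvBF_edge d (edgesB maps H W) d e he
      rw [← roundB_eq_pvBF, heq] at this
      exact this
    · rw [if_neg heq]
      have hmun : pvMu H W (roundB (edgesB maps H W) d) < pvMu H W d :=
        pvMu_lt hk hkeysn hlen hlabn hl heq
      obtain ⟨c1, c2, c3⟩ := ih (roundB (edgesB maps H W) d) hkeysn hlabn (by omega)
      exact ⟨fun p => le_trans (c1 p) (hlen p), c2, c3⟩


-- dict-building fold lookup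
theorem pvGetDFoldlInsert {κ ν : Type} [BEq κ] [LawfulBEq κ] [DecidableEq κ] (F : κ → ν) (dflt : ν)
    (l : List κ) (d : PySem.Dict κ ν) (p : κ)
    (h : p ∈ l ∨ PySem.Dict.getD d p dflt = F p) :
    PySem.Dict.getD (l.foldl (fun d q => d.insert q (F q)) d) p dflt = F p := by
  induction l generalizing d with
  | nil => simpa using h.resolve_left (by simp)
  | cons q t ih =>
    simp only [List.foldl_cons]
    apply ih
    by_cases hpq : p = q
    · right; subst hpq; simp [PySem.Dict.getD_insert]
    · rcases h with hmem | hval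
      · rcases List.mem_cons.1 hmem with rfl | hmem
        · right; simp [PySem.Dict.getD_insert]
        · left; exact hmem
      · right; simpa [PySem.Dict.getD_insert, hpq] using hval

theorem B_ans {maps : List (List String)} {H W : Int} (hctx : pvCtx maps H W)
    {tera : Int × Int} (goal : Int × Int) (htera : pvInb H W tera) :
    pvAns maps H W tera goal
      ((fun dF => if dF.getD goal pvINF < pvINF then dF.getD goal pvINF else -1)
        (bellLoop (edgesB maps H W) (pvBellFuel maps)
          ((posB H W).foldl (fun d p => d.insert p (if p = tera then 0 else pvINF))
            PySem.Dict.empty))) := by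
  set d0 := (posB H W).foldl (fun d p => d.insert p (if p = tera then 0 else pvINF))
    PySem.Dict.empty with hd0
  have hkeys0 : d0.keys = posB H W := by
    rw [hd0, PySem.Dict.keys_foldl_insert]
    have hke : (PySem.Dict.empty : PySem.Dict (Int × Int) Int).keys = [] := rfl
    rw [hke, PySem.Set.update_nil_left, PySem.Set.ofList_eq_self_of_nodup _ (posB_nodup H W)]
  have hget0 : ∀ p ∈ posB H W, d0.getD p pvINF = (if p = tera then 0 else pvINF) := by
    intro p hp
    rw [hd0]
    exact pvGetDFoldlInsert _ pvINF _ _ p (Or.inl hp)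
  have hget0' : ∀ p, p ∉ posB H W → d0.getD p pvINF = pvINF := by
    intro p hp
    refine PySem.Dict.getD_of_not_contains d0 pvINF ?_
    cases hb : d0.contains p
    · rfl
    · exfalso
      apply hp
      rw [← hkeys0]
      exact (PySem.Dict.contains_iff_mem_keys _ _).1 hb
  have hlab0 : pvLab maps H W tera d0 := by
    intro p
    by_cases hp : p ∈ posB H W
    · rw [hget0 p hp]
      split_ifs with hpt
      · subst hpt
        right
        exact ⟨le_refl 0, by norm_num [pvINF], pvReach.base⟩
      · left; rfl
    · left; exact hget0' p hp
  have hmu0 : pvMu H W d0 < pvBellFuel maps := by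
    obtain ⟨hH, hW, h1, h2, _, _⟩ := hctx
    have hbound : ∀ x ∈ (posB H W).map (fun p => (d0.getD p pvINF).toNat), x ≤ 10 ^ 18 := by
      intro x hx
      rw [List.mem_map] at hx
      obtain ⟨p, hp, rfl⟩ := hx
      rw [hget0 p hp]
      split_ifs <;> simp [pvINF]
    have hsum := List.sum_le_card_nsmul _ _ hbound
    rw [List.length_map, posB_length] at hsum
    unfold pvMu pvBellFuel
    have hHt : H.toNat = maps.length := by omega
    have hWt : W.toNat = (maps.headD []).length := by omega
    rw [hHt, hWt] at hsum
    simp only [smul_eq_mul] at hsum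
    omega
  obtain ⟨hle, hlab, hfix⟩ := bellLoop_spec hctx (pvBellFuel maps) d0 hkeys0 hlab0 hmu0
  set dF := bellLoop (edgesB maps H W) (pvBellFuel maps) d0 with hdF
  have hreach_le : ∀ v c, pvReach maps H W tera v c → dF.getD v pvINF ≤ c := by
    intro v c h
    induction h with
    | base =>
      refine le_trans (hle tera) ?_
      rw [hget0 tera (mem_posB htera), if_pos rfl]
    | step _ he ih =>
      have h2 := hfix _ he
      simp only at h2
      omega
  show pvAns maps H W tera goal (if dF.getD goal pvINF < pvINF then dF.getD goal pvINF else -1)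
  by_cases hg : dF.getD goal pvINF < pvINF
  · rw [if_pos hg]
    left
    refine ⟨dF.getD goal pvINF, ⟨?_, ?_⟩, hg, rfl⟩
    · rcases hlab goal with h | ⟨_, _, h⟩
      · rw [h] at hg; omega
      · exact h
    · intro c' hc'
      exact hreach_le goal c' hc'
  · rw [if_neg hg]
    right
    refine ⟨?_, rfl⟩
    rintro ⟨c, hc, hcf⟩
    exact hg (by have := hreach_le goal c hc; omega)


-- ---------- A side: the Dijkstra loop also returns the least-cost answer ----------
theorem adj_to_edge {maps : List (List String)} {H W : Int} {p : Int × Int}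
    (hp : p ∈ posB H W) {e : Int × Int × Int} (he : e ∈ adjList maps H W p) :
    (p, (e.1, e.2.1), e.2.2) ∈ edgesB maps H W :=
  mem_edgesB_iff.2 ⟨hp, e, he, rfl, rfl⟩

structure pvInvA (maps : List (List String)) (H W : Int) (tera goal : Int × Int)
    (S : Finset (Int × Int)) (pq : List (Int × Int × Int)) (d : List (List Int)) : Prop where
  good : pvGoodA H W d
  base : pvDA d tera = 0
  le_inf : ∀ p, pvInb H W p → pvDA d p ≤ pvINF
  reach : ∀ p, pvInb H W p → pvDA d p < pvINF → pvReach maps H W tera p (pvDA d p)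
  ssub : S ⊆ (posB H W).toFinset
  sleast : ∀ v ∈ S, pvLeastR (pvReach maps H W tera v) (pvDA d v)
  sfin : ∀ v ∈ S, pvDA d v < pvINF
  srelax : ∀ v ∈ S, ∀ e ∈ adjList maps H W v, pvDA d (e.1, e.2.1) ≤ pvDA d v + e.2.2
  qinb : ∀ q ∈ pq, pvInb H W (q.2.1, q.2.2)
  qge : ∀ q ∈ pq, pvDA d (q.2.1, q.2.2) ≤ q.1
  qfin : ∀ q ∈ pq, q.1 < pvINF
  qreach : ∀ q ∈ pq, pvReach maps H W tera (q.2.1, q.2.2) q.1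
  fringe : ∀ p, pvInb H W p → p ∉ S → pvDA d p < pvINF → (pvDA d p, p.1, p.2) ∈ pq
  gnot : goal ∉ S

-- every walk of cost < INF ends in a settled vertex, or passes a fringe vertex whose
-- label is at most the walk's cost
theorem pvWalkFirstOut {maps : List (List String)} {H W : Int} (hctx : pvCtx maps H W)
    {tera : Int × Int} (htera : pvInb H W tera) {S : Finset (Int × Int)}
    {d : List (List Int)} (hbase : pvDA d tera = 0)
    (hsleast : ∀ v ∈ S, pvLeastR (pvReach maps H W tera v) (pvDA d v))
    (hsrelax : ∀ v ∈ S, ∀ e ∈ adjList maps H W v, pvDA d (e.1, e.2.1) ≤ pvDA d v + e.2.2) :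
    ∀ v c, pvReach maps H W tera v c → c < pvINF →
      (v ∈ S ∧ pvDA d v ≤ c) ∨
      (∃ y, pvInb H W y ∧ y ∉ S ∧ pvDA d y ≤ c ∧ pvDA d y < pvINF) := by
  intro v c h
  induction h with
  | base =>
    intro hcf
    by_cases hS : tera ∈ S
    · exact Or.inl ⟨hS, by omega⟩
    · exact Or.inr ⟨tera, htera, hS, by omega, by omega⟩
  | step hr he ih =>
    rename_i u c' v' w'
    intro hcf
    have hw := ctx_edge_w_nonneg hctx he
    have hvin := ctx_edge_inb hctx he
    rcases ih (by omega) with ⟨huS, hduc⟩ | ⟨y, hy1, hy2, hy3, hy4⟩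
    · obtain ⟨hu, e, hee, hve, hwe⟩ := mem_edgesB_iff.1 he
      have hdv : pvDA d v' ≤ pvDA d u + w' := by
        rw [hve, hwe]
        exact hsrelax u huS e hee
      by_cases hvS : v' ∈ S
      · exact Or.inl ⟨hvS, by omega⟩
      · exact Or.inr ⟨v', hvin, hvS, by omega, by omega⟩
    · exact Or.inr ⟨y, hy1, hy2, by omega, hy4⟩

theorem pop_least {maps : List (List String)} {H W : Int} (hctx : pvCtx maps H W)
    {tera goal : Int × Int} (htera : pvInb H W tera) {S : Finset (Int × Int)}
    {pq pq' : List (Int × Int × Int)} {d : List (List Int)}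
    (inv : pvInvA maps H W tera goal S pq d) {cur ry rx : Int}
    (hpop : pvPopMin pq = some ((cur, ry, rx), pq'))
    (hmatch : cur = pvDA d (ry, rx)) :
    pvLeastR (pvReach maps H W tera (ry, rx)) cur ∧ cur < pvINF := by
  obtain ⟨hmem, herase, hmin⟩ := pvPopMin_spec hpop
  refine ⟨⟨inv.qreach _ hmem, ?_⟩, inv.qfin _ hmem⟩
  intro c hc
  by_cases hcf : c < pvINF
  · rcases pvWalkFirstOut hctx htera inv.base inv.sleast inv.srelax _ c hc hcf with
      ⟨hS, hd⟩ | ⟨y, hy1, hy2, hy3, hy4⟩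
    · have hl := inv.sleast _ hS
      rw [hmatch]
      exact le_trans (hl.2 c hc) (le_refl c) |>.trans' (le_refl _) |>.trans (le_refl _)
    · have hent := inv.fringe y hy1 hy2 hy4
      have := hmin _ hent
      omega
  · have := inv.qfin _ hmem
    omega


theorem pushA_fired {cur : Int} {s : List (Int × Int × Int) × List (List Int)}
    {e : Int × Int × Int} (h : cur + e.2.2 < pvDA s.2 (e.1, e.2.1)) :
    pushA cur s e = (s.1 ++ [(cur + e.2.2, e.1, e.2.1)], pvSet s.2 (e.1, e.2.1) (cur + e.2.2)) :=
  if_pos h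

theorem pushA_skip {cur : Int} {s : List (Int × Int × Int) × List (List Int)}
    {e : Int × Int × Int} (h : ¬ cur + e.2.2 < pvDA s.2 (e.1, e.2.1)) :
    pushA cur s e = s :=
  if_neg h

theorem pushA_fold_id {cur : Int} :
    ∀ (es : List (Int × Int × Int)) (s : List (Int × Int × Int) × List (List Int)),
    (∀ e ∈ es, ¬ cur + e.2.2 < pvDA s.2 (e.1, e.2.1)) →
    es.foldl (pushA cur) s = s := by
  intro es
  induction es with
  | nil => intro s _; rfl
  | cons e t ih =>
    intro s hs
    rw [List.foldl_cons, pushA_skip (hs e (by simp))]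
    exact ih s (fun e' he' => hs e' (by simp [he']))

theorem pushA_fold_len {cur : Int} :
    ∀ (es : List (Int × Int × Int)) (s : List (Int × Int × Int) × List (List Int)),
    (es.foldl (pushA cur) s).1.length ≤ s.1.length + es.length := by
  intro es
  induction es with
  | nil => intro s; simp
  | cons e t ih =>
    intro s
    rw [List.foldl_cons]
    by_cases h : cur + e.2.2 < pvDA s.2 (e.1, e.2.1)
    · rw [pushA_fired h]
      have hthis := ih (s.1 ++ [(cur + e.2.2, e.1, e.2.1)], pvSet s.2 (e.1, e.2.1) (cur + e.2.2))
      have hfst : (s.1 ++ [(cur + e.2.2, e.1, e.2.1)],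
          pvSet s.2 (e.1, e.2.1) (cur + e.2.2)).1 = s.1 ++ [(cur + e.2.2, e.1, e.2.1)] := rfl
      rw [hfst, List.length_append, List.length_singleton] at hthis
      rw [List.length_cons]
      omega
    · rw [pushA_skip h]
      have := ih s
      simp only [List.length_cons] at this ⊢
      omega

-- the invariant carried through one relaxation fold
def pvFoldInv (maps : List (List String)) (H W : Int) (tera : Int × Int)
    (S' : Finset (Int × Int)) (d : List (List Int))
    (s : List (Int × Int × Int) × List (List Int)) : Prop :=
  pvGoodA H W s.2 ∧
  (∀ p, pvInb H W p → pvDA s.2 p ≤ pvDA d p) ∧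
  (∀ u ∈ S', pvDA s.2 u = pvDA d u) ∧
  (∀ p, pvInb H W p → pvDA s.2 p < pvINF → pvReach maps H W tera p (pvDA s.2 p)) ∧
  pvDA s.2 tera = 0 ∧
  (∀ q ∈ s.1, pvInb H W (q.2.1, q.2.2) ∧ pvDA s.2 (q.2.1, q.2.2) ≤ q.1 ∧ q.1 < pvINF ∧
    pvReach maps H W tera (q.2.1, q.2.2) q.1) ∧
  (∀ p, pvInb H W p → p ∉ S' → pvDA s.2 p < pvINF → (pvDA s.2 p, p.1, p.2) ∈ s.1)

theorem pushA_fold_inv {maps : List (List String)} {H W : Int} (hctx : pvCtx maps H W)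
    {tera : Int × Int} (htera : pvInb H W tera) {S' : Finset (Int × Int)}
    {d : List (List Int)} {v : Int × Int} {cur : Int}
    (hvS : v ∈ S') (hS'inb : ∀ u ∈ S', pvInb H W u)
    (hreachv : pvReach maps H W tera v cur)
    (hsleast : ∀ u ∈ S', pvLeastR (pvReach maps H W tera u) (pvDA d u))
    (hle_inf : ∀ p, pvInb H W p → pvDA d p ≤ pvINF) :
    ∀ (es : List (Int × Int × Int)),
    (∀ e ∈ es, pvInb H W (e.1, e.2.1) ∧ 0 ≤ e.2.2 ∧
      (v, (e.1, e.2.1), e.2.2) ∈ edgesB maps H W) →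
    ∀ s, pvFoldInv maps H W tera S' d s →
    pvFoldInv maps H W tera S' d (es.foldl (pushA cur) s) := by
  intro es
  induction es with
  | nil => intro _ s h; exact h
  | cons e t ih =>
    intro hes s hs
    rw [List.foldl_cons]
    refine ih (fun e' he' => hes e' (by simp [he'])) _ ?_
    obtain ⟨heinb, hew, heedge⟩ := hes e (by simp)
    by_cases hf : cur + e.2.2 < pvDA s.2 (e.1, e.2.1)
    · rw [pushA_fired hf]
      obtain ⟨good, mono, stable, reach, base, qprops, fringe⟩ := hs
      have hcur0 : 0 ≤ cur := reach_nonneg hctx hreachv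
      have hnd_reach : pvReach maps H W tera (e.1, e.2.1) (cur + e.2.2) :=
        pvReach.step hreachv heedge
      have hDA := fun (q : Int × Int) (hq : pvInb H W q) =>
        pvDA_update good heinb (cur + e.2.2) hq
      have hslt : pvDA s.2 (e.1, e.2.1) ≤ pvDA d (e.1, e.2.1) := mono _ heinb
      have hndf : cur + e.2.2 < pvINF := by
        have := hle_inf _ heinb
        omega
      refine ⟨pvGoodA_update good heinb _, ?_, ?_, ?_, ?_, ?_, ?_⟩
      · intro p hp
        rw [hDA p hp]
        split_ifs with hpe
        · subst hpe; omega
        · exact mono p hp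
      · intro u hu
        rw [hDA u (hS'inb u hu)]
        split_ifs with hue
        · exfalso
          have hleastu := hsleast u hu
          have hge : pvDA d u ≤ cur + e.2.2 := hleastu.2 _ (by rw [hue]; exact hnd_reach)
          have hst := stable u hu
          rw [← hue] at hf
          omega
        · exact stable u hu
      · intro p hp hpf
        rw [hDA p hp] at hpf ⊢
        by_cases hpe : p = (e.1, e.2.1)
        · rw [if_pos hpe] at hpf ⊢
          rw [hpe]
          exact hnd_reach
        · rw [if_neg hpe] at hpf ⊢
          exact reach p hp hpf
      · rw [hDA tera htera]
        split_ifs with hte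
        · exfalso
          rw [← hte] at hf
          omega
        · exact base
      · intro q hq
        rcases List.mem_append.1 hq with hold | hnew
        · obtain ⟨q1, q2, q3, q4⟩ := qprops q hold
          refine ⟨q1, ?_, q3, q4⟩
          rw [hDA _ q1]
          split_ifs with hqe
          · rw [hqe] at q2; omega
          · exact q2
        · have hqeq : q = (cur + e.2.2, e.1, e.2.1) := by simpa using hnew
          subst hqeq
          refine ⟨heinb, ?_, hndf, hnd_reach⟩
          rw [hDA _ heinb, if_pos rfl]
      · intro p hp hpS hpf
        rw [hDA p hp] at hpf ⊢
        by_cases hpe : p = (e.1, e.2.1)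
        · subst hpe
          rw [if_pos rfl] at hpf ⊢
          exact List.mem_append.2 (Or.inr (by simp))
        · rw [if_neg hpe] at hpf ⊢
          exact List.mem_append.2 (Or.inl (fringe p hp hpS hpf))
    · rw [pushA_skip hf]
      exact hs

theorem pushA_fold_mono {H W : Int} {cur : Int} :
    ∀ (es : List (Int × Int × Int)) (s : List (Int × Int × Int) × List (List Int)),
    pvGoodA H W s.2 → (∀ e ∈ es, pvInb H W (e.1, e.2.1)) →
    pvGoodA H W (es.foldl (pushA cur) s).2 ∧
    (∀ p, pvInb H W p → pvDA (es.foldl (pushA cur) s).2 p ≤ pvDA s.2 p) := by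
  intro es
  induction es with
  | nil => intro s hg _; exact ⟨hg, fun p _ => le_refl _⟩
  | cons e t ih =>
    intro s hg hes
    rw [List.foldl_cons]
    have heinb := hes e (by simp)
    by_cases hf : cur + e.2.2 < pvDA s.2 (e.1, e.2.1)
    · rw [pushA_fired hf]
      have hg' := pvGoodA_update hg heinb (cur + e.2.2)
      obtain ⟨c1, c2⟩ := ih (s.1 ++ [(cur + e.2.2, e.1, e.2.1)],
        pvSet s.2 (e.1, e.2.1) (cur + e.2.2)) hg' (fun e' he' => hes e' (by simp [he']))
      refine ⟨c1, ?_⟩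
      intro p hp
      refine le_trans (c2 p hp) ?_
      rw [pvDA_update hg heinb _ hp]
      split_ifs with hpe
      · subst hpe; omega
      · exact le_refl _
    · rw [pushA_skip hf]
      exact ih s hg (fun e' he' => hes e' (by simp [he']))

theorem pushA_fold_bound {H W : Int} {cur : Int} :
    ∀ (es : List (Int × Int × Int)) (s : List (Int × Int × Int) × List (List Int)),
    pvGoodA H W s.2 → (∀ e ∈ es, pvInb H W (e.1, e.2.1)) →
    (∀ e ∈ es, pvDA (es.foldl (pushA cur) s).2 (e.1, e.2.1) ≤ cur + e.2.2) := by
  intro es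
  induction es with
  | nil => intro s _ _ e he; simp at he
  | cons a t ih =>
    intro s hg hes e he
    have hainb := hes a (by simp)
    rw [List.foldl_cons]
    by_cases hf : cur + a.2.2 < pvDA s.2 (a.1, a.2.1)
    · rw [pushA_fired hf]
      have hg' := pvGoodA_update hg hainb (cur + a.2.2)
      rcases List.mem_cons.1 he with rfl | he'
      · obtain ⟨_, hmono⟩ := pushA_fold_mono t (s.1 ++ [(cur + e.2.2, e.1, e.2.1)],
          pvSet s.2 (e.1, e.2.1) (cur + e.2.2)) hg' (fun e' he' => hes e' (by simp [he']))
        refine le_trans (hmono _ hainb) ?_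
        have := pvDA_update hg hainb (cur + e.2.2) hainb
        rw [this, if_pos rfl]
      · exact ih (s.1 ++ [(cur + a.2.2, a.1, a.2.1)], pvSet s.2 (a.1, a.2.1) (cur + a.2.2))
          hg' (fun e' he' => hes e' (by simp [he'])) e he'
    · rw [pushA_skip hf]
      rcases List.mem_cons.1 he with rfl | he'
      · obtain ⟨_, hmono⟩ := pushA_fold_mono t s hg (fun e' he' => hes e' (by simp [he']))
        refine le_trans (hmono _ hainb) (by omega)
      · exact ih s hg (fun e' he' => hes e' (by simp [he'])) e he'


theorem invA_erase {maps : List (List String)} {H W : Int} {tera goal : Int × Int}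
    {S : Finset (Int × Int)} {pq : List (Int × Int × Int)} {d : List (List Int)}
    (inv : pvInvA maps H W tera goal S pq d) {m : Int × Int × Int}
    (hcond : ∀ p, pvInb H W p → p ∉ S → pvDA d p < pvINF → (pvDA d p, p.1, p.2) ≠ m) :
    pvInvA maps H W tera goal S (pq.erase m) d where
  good := inv.good
  base := inv.base
  le_inf := inv.le_inf
  reach := inv.reach
  ssub := inv.ssub
  sleast := inv.sleast
  sfin := inv.sfin
  srelax := inv.srelax
  qinb := fun q hq => inv.qinb q (List.mem_of_mem_erase hq)
  qge := fun q hq => inv.qge q (List.mem_of_mem_erase hq)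
  qfin := fun q hq => inv.qfin q (List.mem_of_mem_erase hq)
  qreach := fun q hq => inv.qreach q (List.mem_of_mem_erase hq)
  fringe := fun p hp hpS hpf =>
    (List.mem_erase_of_ne (hcond p hp hpS hpf)).2 (inv.fringe p hp hpS hpf)
  gnot := inv.gnot

theorem relax_eq {maps : List (List String)} {H W : Int} (hctx : pvCtx maps H W)
    {ry rx : Int} (hin : pvInb H W (ry, rx)) (cur : Int)
    (s : List (Int × Int × Int) × List (List Int)) :
    moveA.foldl (relaxA maps H W (pvSlideFuel maps) ry rx cur) s =
      (adjList maps H W (ry, rx)).foldl (pushA cur) s := by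
  have hmv : moveA = dirsB := rfl
  rw [hmv]
  unfold adjList
  rw [← pvFoldlMatchFilterMap dirsB
    (fun m => edgeB maps (rayB H W (ry, rx).1 (ry, rx).2 m.1 m.2) (ry, rx).1 (ry, rx).2 0)
    (pushA cur) s]
  apply PySem.List.foldl_congr_mem
  intro acc m hm
  show relaxA maps H W (pvSlideFuel maps) ry rx cur acc m = _
  unfold relaxA
  rw [rmoveA_eq_edgeB, ← ctx_ray_eq hctx hin hm]
  cases h' : edgeB maps (rayB H W ry rx m.1 m.2) ry rx 0 <;> simp only [h']

theorem pvPopMin_none {pq : List (Int × Int × Int)} (h : pvPopMin pq = none) : pq = [] := by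
  cases pq with
  | nil => rfl
  | cons a t => simp [pvPopMin] at h

theorem loopA_ans {maps : List (List String)} {H W : Int} (hctx : pvCtx maps H W)
    {tera goal : Int × Int} (htera : pvInb H W tera) :
    ∀ (fuel : Nat) (S : Finset (Int × Int)) (pq : List (Int × Int × Int))
      (d : List (List Int)),
    pvInvA maps H W tera goal S pq d →
    pq.length + 4 * ((posB H W).length - S.card) < fuel →
    pvAns maps H W tera goal (loopA maps H W (pvSlideFuel maps) goal fuel pq d) := by
  intro fuel
  induction fuel with
  | zero => intro S pq d _ h; omega
  | succ f ih =>
    intro S pq d inv hmeas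
    simp only [loopA]
    cases hpop : pvPopMin pq with
    | none =>
      have hnil := pvPopMin_none hpop
      right
      refine ⟨?_, rfl⟩
      rintro ⟨c, hc, hcf⟩
      rcases pvWalkFirstOut hctx htera inv.base inv.sleast inv.srelax goal c hc hcf with
        ⟨hgS, _⟩ | ⟨y, hy1, hy2, hy3, hy4⟩
      · exact inv.gnot hgS
      · have := inv.fringe y hy1 hy2 hy4
        rw [hnil] at this
        simp at this
    | some pr =>
      obtain ⟨⟨cur, ry, rx⟩, pq'⟩ := pr
      dsimp only
      obtain ⟨hmem, herase, hmin⟩ := pvPopMin_spec hpop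
      have hin : pvInb H W (ry, rx) := inv.qinb _ hmem
      have hraw : PySem.List.pyGetD (PySem.List.pyGetD d ry []) rx pvINF = pvDA d (ry, rx) := rfl
      rw [hraw]
      have hlen' : pq'.length + 1 = pq.length := by
        rw [herase, List.length_erase_of_mem hmem]
        have : 0 < pq.length := List.length_pos_of_mem hmem
        omega
      by_cases hstale : cur = pvDA d (ry, rx)
      · rw [if_neg (not_ne_iff.mpr hstale)]
        obtain ⟨hleast, hfin⟩ := pop_least hctx htera inv hpop hstale
        by_cases hgoal : (ry, rx) = goal
        · rw [if_pos hgoal]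
          left
          exact ⟨cur, by rw [← hgoal]; exact hleast, hfin, rfl⟩
        · rw [if_neg hgoal]
          rw [relax_eq hctx hin cur]
          by_cases hvS : (ry, rx) ∈ S
          · have hid : (adjList maps H W (ry, rx)).foldl (pushA cur) (pq', d) = (pq', d) := by
              refine pushA_fold_id _ _ ?_
              intro e he
              have := inv.srelax _ hvS e he
              show ¬ cur + e.2.2 < pvDA d (e.1, e.2.1)
              omega
            rw [hid]
            have hcond : ∀ p, pvInb H W p → p ∉ S → pvDA d p < pvINF →
                (pvDA d p, p.1, p.2) ≠ (cur, ry, rx) := by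
              intro p hp hpS _ heq
              apply hpS
              have h1 : p.1 = ry := congrArg (fun t => t.2.1) heq
              have h2 : p.2 = rx := congrArg (fun t => t.2.2) heq
              have : p = (ry, rx) := Prod.ext h1 h2
              rw [this]
              exact hvS
            refine ih S pq' d (herase ▸ invA_erase inv hcond) ?_
            omega
          · set S' := insert (ry, rx) S with hS'
            have hvposB : (ry, rx) ∈ posB H W := mem_posB hin
            have hreachv : pvReach maps H W tera (ry, rx) cur := hleast.1
            have hsleast' : ∀ u ∈ S', pvLeastR (pvReach maps H W tera u) (pvDA d u) := by
              intro u hu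
              rcases Finset.mem_insert.1 hu with rfl | hu'
              · rw [← hstale]; exact hleast
              · exact inv.sleast u hu'
            have hS'inb : ∀ u ∈ S', pvInb H W u := by
              intro u hu
              rcases Finset.mem_insert.1 hu with rfl | hu'
              · exact hin
              · exact posB_mem (List.mem_toFinset.1 (inv.ssub hu'))
            have hes : ∀ e ∈ adjList maps H W (ry, rx), pvInb H W (e.1, e.2.1) ∧ 0 ≤ e.2.2 ∧
                ((ry, rx), (e.1, e.2.1), e.2.2) ∈ edgesB maps H W := by
              intro e he
              exact ⟨ctx_adj_inb hctx hin he, ctx_adj_w_nonneg hctx hin he,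
                adj_to_edge hvposB he⟩
            have hfold0 : pvFoldInv maps H W tera S' d (pq', d) := by
              refine ⟨inv.good, fun p _ => le_refl _, fun u _ => rfl, inv.reach, inv.base,
                ?_, ?_⟩
              · intro q hq
                have hq' : q ∈ pq := List.mem_of_mem_erase (by rw [← herase]; exact hq)
                exact ⟨inv.qinb q hq', inv.qge q hq', inv.qfin q hq', inv.qreach q hq'⟩
              · intro p hp hpS' hpf
                have hpS : p ∉ S := fun hc => hpS' (Finset.mem_insert_of_mem hc)
                have hpv : p ≠ (ry, rx) := fun hc => hpS' (hc ▸ Finset.mem_insert_self _ _)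
                have hne : (pvDA d p, p.1, p.2) ≠ (cur, ry, rx) := by
                  intro heq
                  apply hpv
                  exact Prod.ext (congrArg (fun t => t.2.1) heq)
                    (congrArg (fun t => t.2.2) heq)
                rw [herase]
                exact (List.mem_erase_of_ne hne).2 (inv.fringe p hp hpS hpf)
            have hff := pushA_fold_inv hctx htera (Finset.mem_insert_self (ry, rx) S)
              hS'inb hreachv hsleast' inv.le_inf (adjList maps H W (ry, rx)) hes
              (pq', d) hfold0
            obtain ⟨good', mono', stable', reach', base', qprops', fringe'⟩ := hff
            have hstv : pvDA ((adjList maps H W (ry, rx)).foldl (pushA cur) (pq', d)).2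
                (ry, rx) = cur := by
              rw [stable' _ (Finset.mem_insert_self _ _), ← hstale]
            have inv' : pvInvA maps H W tera goal S'
                ((adjList maps H W (ry, rx)).foldl (pushA cur) (pq', d)).1
                ((adjList maps H W (ry, rx)).foldl (pushA cur) (pq', d)).2 := by
              refine ⟨good', base', ?_, reach', ?_, ?_, ?_, ?_,
                fun q hq => (qprops' q hq).1, fun q hq => (qprops' q hq).2.1,
                fun q hq => (qprops' q hq).2.2.1, fun q hq => (qprops' q hq).2.2.2,
                fringe', ?_⟩
              · intro p hp
                exact le_trans (mono' p hp) (inv.le_inf p hp)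
              · rw [hS']
                refine Finset.insert_subset_iff.2 ⟨List.mem_toFinset.2 hvposB, inv.ssub⟩
              · intro u hu
                rw [stable' u hu]
                exact hsleast' u hu
              · intro u hu
                rw [stable' u hu]
                rcases Finset.mem_insert.1 hu with rfl | hu'
                · rw [← hstale]; exact hfin
                · exact inv.sfin u hu'
              · intro u hu e he
                rcases Finset.mem_insert.1 hu with rfl | hu'
                · have hb := pushA_fold_bound (cur := cur) (adjList maps H W (ry, rx)) (pq', d)
                    inv.good (fun e' he' => (hes e' he').1) e he
                  rw [stable' _ (Finset.mem_insert_self _ _), ← hstale]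
                  exact hb
                · have htin := ctx_adj_inb hctx (hS'inb u hu) he
                  have h1 := mono' _ htin
                  have h2 := inv.srelax u hu' e he
                  have h3 := stable' u hu
                  omega
              · rw [hS']
                intro hc
                rcases Finset.mem_insert.1 hc with hc' | hc'
                · exact hgoal hc'.symm
                · exact inv.gnot hc'
            have hlen2 := pushA_fold_len (cur := cur) (adjList maps H W (ry, rx)) (pq', d)
            have hp1 : ((pq', d) : List (Int × Int × Int) × List (List Int)).1 = pq' := rfl
            rw [hp1] at hlen2
            have hadj4 : (adjList maps H W (ry, rx)).length ≤ 4 := by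
              have := List.length_filterMap_le
                (fun m => edgeB maps (rayB H W (ry, rx).1 (ry, rx).2 m.1 m.2) (ry, rx).1 (ry, rx).2 0) dirsB
              simpa [dirsB] using this
            have hcard : S'.card = S.card + 1 := Finset.card_insert_of_notMem hvS
            have hcardle : S'.card ≤ (posB H W).length := by
              refine le_trans (Finset.card_le_card inv'.ssub) ?_
              exact List.toFinset_card_le _
            refine ih S' _ _ inv' ?_
            omega
      · rw [if_pos hstale]
        have hcond : ∀ p, pvInb H W p → p ∉ S → pvDA d p < pvINF →
            (pvDA d p, p.1, p.2) ≠ (cur, ry, rx) := by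
          intro p hp hpS _ heq
          by_cases hpv : p = (ry, rx)
          · apply hstale
            have h1 : pvDA d p = cur := congrArg (fun t => t.1) heq
            rw [← hpv, h1]
          · apply hpv
            exact Prod.ext (congrArg (fun t => t.2.1) heq) (congrArg (fun t => t.2.2) heq)
        refine ih S pq' d (herase ▸ invA_erase inv hcond) ?_
        omega


-- ---------- start/goal scan and final assembly ----------
theorem scanTE_eq (maps : List (List String)) (H W : Int) :
    scanTE maps H W =
      (((posB H W).filter (fun p => pvCell maps p.1 p.2 == "T")).getLast?.getD (0, 0),
       ((posB H W).filter (fun p => pvCell maps p.1 p.2 == "E")).getLast?.getD (0, 0)) := by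
  unfold scanTE
  have hstep1 : (PySem.List.pyRange 0 H 1).foldl (fun s i =>
      (PySem.List.pyRange 0 W 1).foldl (fun s ii =>
        let s1 := if pvCell maps i ii == "E" then (s.1, (i, ii)) else s
        if pvCell maps i ii == "T" then ((i, ii), s1.2) else s1) s) (((0:Int), (0:Int)), ((0:Int), (0:Int))) =
      (PySem.List.pyRange 0 H 1).foldl (fun s i =>
      (PySem.List.pyRange 0 W 1).foldl (fun s ii =>
        (if pvCell maps i ii == "T" then (i, ii) else s.1,
         if pvCell maps i ii == "E" then (i, ii) else s.2)) s) (((0:Int), (0:Int)), ((0:Int), (0:Int))) := by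
    apply PySem.List.foldl_congr_mem
    intro acc i _
    apply PySem.List.foldl_congr_mem
    intro s ii _
    by_cases hT : pvCell maps i ii == "T" <;> by_cases hE : pvCell maps i ii == "E" <;>
      simp [hT, hE]
  rw [hstep1]
  have hstep2 : ∀ init : (Int × Int) × (Int × Int), (PySem.List.pyRange 0 H 1).foldl (fun s i =>
      (PySem.List.pyRange 0 W 1).foldl (fun s ii =>
        (if pvCell maps i ii == "T" then (i, ii) else s.1,
         if pvCell maps i ii == "E" then (i, ii) else s.2)) s) init =
      (posB H W).foldl (fun s p =>
        (if pvCell maps p.1 p.2 == "T" then p else s.1,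
         if pvCell maps p.1 p.2 == "E" then p else s.2)) init := by
    intro init
    unfold posB
    rw [← pvFoldlNested]
    apply PySem.List.foldl_congr_mem
    intro acc i _
    rw [List.foldl_map]
  rw [hstep2]
  have hpm := PySem.List.foldl_prod_mk
    (fun (a : Int × Int) (p : Int × Int) => if pvCell maps p.1 p.2 == "T" then p else a)
    (fun (a : Int × Int) (p : Int × Int) => if pvCell maps p.1 p.2 == "E" then p else a)
    (posB H W) ((0 : Int), (0 : Int)) ((0 : Int), (0 : Int))
  rw [hpm]
  rw [Prod.mk.injEq]
  constructor
  · rw [pvFoldlOverwrite]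
  · rw [pvFoldlOverwrite]

-- ===== VERDICT (by name: the statement is the Claim_ definition above) =====
theorem solution_spec : Claim_equal_solution := by
  unfold Claim_equal_solution
  intro maps hdom hpre
  obtain ⟨hne, hW1, hrows, hdig⟩ := hpre
  have hH1 : 1 ≤ maps.length := by
    cases maps with
    | nil => exact absurd rfl hne
    | cons a t => simp
  have hctx : pvCtx maps ((maps.length : Int)) (((maps.headD []).length : Int)) :=
    ⟨rfl, rfl, hH1, hW1, hrows, hdig⟩
  set H : Int := (maps.length : Int) with hHdef
  set W : Int := ((maps.headD []).length : Int) with hWdef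
  set tera := ((posB H W).filter (fun p => pvCell maps p.1 p.2 == "T")).getLast?.getD
    ((0 : Int), (0 : Int)) with hteradef
  set goal := ((posB H W).filter (fun p => pvCell maps p.1 p.2 == "E")).getLast?.getD
    ((0 : Int), (0 : Int)) with hgoaldef
  have htera : pvInb H W tera := by
    rw [hteradef]
    cases hlast : ((posB H W).filter (fun p => pvCell maps p.1 p.2 == "T")).getLast? with
    | none =>
      simp only [Option.getD]
      exact ⟨le_refl 0, by omega, le_refl 0, by omega⟩
    | some p =>
      simp only [Option.getD]
      exact posB_mem (List.mem_of_mem_filter (List.mem_of_getLast? hlast))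
  have hgood0 : pvGoodA H W (List.replicate maps.length (List.replicate (maps.headD []).length pvINF)) := by
    refine ⟨by simp [hHdef], ?_⟩
    intro r hr
    rw [List.eq_of_mem_replicate hr]
    simp [hWdef]
  have hDA0 : ∀ p, pvInb H W p →
      pvDA (List.replicate maps.length (List.replicate (maps.headD []).length pvINF)) p = pvINF := by
    intro p hp
    obtain ⟨h1, h2, h3, h4⟩ := hp
    rw [hHdef] at h2
    rw [hWdef] at h4
    have hb1 : p.1 <
        ((List.replicate maps.length (List.replicate (maps.headD []).length pvINF)).length : Int) := by
      rw [List.length_replicate]; omega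
    have hb2 : p.2 < ((List.replicate (maps.headD []).length pvINF).length : Int) := by
      rw [List.length_replicate]; omega
    unfold pvDA
    have e1 : PySem.List.pyGetD
        (List.replicate maps.length (List.replicate (maps.headD []).length pvINF)) p.1
        ([] : List Int) = List.replicate (maps.headD []).length pvINF := by
      rw [PySem.List.pyGetD_eq_getElem _ _ h1 hb1, List.getElem_replicate]
    rw [e1, PySem.List.pyGetD_eq_getElem _ _ h3 hb2, List.getElem_replicate]
  set dist1 := pvSet (List.replicate maps.length (List.replicate (maps.headD []).length pvINF))
    tera 0 with hdist1
  have hDA1 : ∀ p, pvInb H W p → pvDA dist1 p = if p = tera then 0 else pvINF := by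
    intro p hp
    rw [hdist1, pvDA_update hgood0 htera 0 hp]
    split_ifs with h
    · rfl
    · exact hDA0 p hp
  have hgood1 : pvGoodA H W dist1 := pvGoodA_update hgood0 htera 0
  have hinv0 : pvInvA maps H W tera goal ∅ [(0, tera.1, tera.2)] dist1 := by
    refine ⟨hgood1, ?_, ?_, ?_, Finset.empty_subset _, ?_, ?_, ?_, ?_, ?_, ?_, ?_, ?_, ?_⟩
    · rw [hDA1 tera htera, if_pos rfl]
    · intro p hp
      rw [hDA1 p hp]
      split_ifs
      · norm_num [pvINF]
      · exact le_refl _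
    · intro p hp hpf
      rw [hDA1 p hp] at hpf ⊢
      split_ifs at hpf ⊢ with h
      · subst h; exact pvReach.base
      · norm_num [pvINF] at hpf
    · intro v hv; exact absurd hv (Finset.notMem_empty v)
    · intro v hv; exact absurd hv (Finset.notMem_empty v)
    · intro v hv; exact absurd hv (Finset.notMem_empty v)
    · intro q hq
      rw [List.mem_singleton] at hq
      subst hq
      exact htera
    · intro q hq
      rw [List.mem_singleton] at hq
      subst hq
      rw [hDA1 tera htera, if_pos rfl]
    · intro q hq
      rw [List.mem_singleton] at hq
      subst hq
      norm_num [pvINF]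
    · intro q hq
      rw [List.mem_singleton] at hq
      subst hq
      exact pvReach.base
    · intro p hp hpS hpf
      rw [hDA1 p hp] at hpf ⊢
      split_ifs at hpf ⊢ with h
      · subst h; simp
      · norm_num [pvINF] at hpf
    · exact Finset.notMem_empty goal
  have hmeas0 : (1 : Nat) + 4 * ((posB H W).length - (∅ : Finset (Int × Int)).card) <
      pvFuel maps := by
    rw [posB_length]
    have hHt : H.toNat = maps.length := by rw [hHdef]; exact Int.toNat_natCast _
    have hWt : W.toNat = (maps.headD []).length := by rw [hWdef]; exact Int.toNat_natCast _
    rw [hHt, hWt]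
    unfold pvFuel
    set N := maps.length * (maps.headD []).length
    have hcube : N ≤ N * N * N := by
      rcases Nat.eq_zero_or_pos N with h | h
      · simp [h]
      · calc N = 1 * 1 * N := by ring
          _ ≤ N * N * N := by
            exact Nat.mul_le_mul (Nat.mul_le_mul h h) (le_refl N)
    simp only [Finset.card_empty, Nat.sub_zero]
    nlinarith [hcube]
  have hA : pvAns maps H W tera goal (solution maps) := by
    unfold solution
    simp only [PySem.List.len_eq]
    rw [scanTE_eq]
    exact loopA_ans hctx htera (pvFuel maps) ∅ [(0, tera.1, tera.2)] dist1 hinv0 hmeas0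
  have hB : pvAns maps H W tera goal (solution_alt maps) := by
    unfold solution_alt
    simp only [PySem.List.len_eq]
    exact B_ans hctx goal htera
  show solution maps = solution_alt maps
  exact pvAns_unique hA hB
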